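-- pv_equiv track=rewrite | github.com/gobioeng/HALbasic | plot_utils.py | group_parameters
-- ===== SOURCE A (Python) =====
-- def group_parameters(parameters):
--     """Group parameters by type for better visualization"""
--     parameter_groups = {
--         'Temperature': [],
--         'Pressure': [],
--         'Flow': [],
--         'Level': [],
--         'Voltage': [],
--         'Current': [],
--         'Humidity': [],
--         'Position': [],
--         'Other': []
--     }
--
--     for param in parameters:
--         param_lower = param.lower()
--         if any(temp_keyword in param_lower for temp_keyword in ['temp', 'temperature', '°c', 'celsius', '°f']):
--             parameter_groups['Temperature'].append(param)
--         elif any(pres_keyword in param_lower for pres_keyword in ['press', 'pressure', 'psi', 'bar', 'mbar', 'pa']):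
--             parameter_groups['Pressure'].append(param)
--         elif any(flow_keyword in param_lower for flow_keyword in ['flow', 'rate', 'gpm', 'lpm', 'l/min']):
--             parameter_groups['Flow'].append(param)
--         elif any(level_keyword in param_lower for level_keyword in ['level', 'height', 'depth', 'tank']):
--             parameter_groups['Level'].append(param)
--         elif any(volt_keyword in param_lower for volt_keyword in ['volt', 'voltage', 'v', 'kv']):
--             parameter_groups['Voltage'].append(param)
--         elif any(curr_keyword in param_lower for curr_keyword in ['current', 'amp', 'ampere', 'ma']):
--             parameter_groups['Current'].append(param)
--         elif any(humid_keyword in param_lower for humid_keyword in ['humid', 'humidity', '%rh', 'moisture']):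
--             parameter_groups['Humidity'].append(param)
--         elif any(pos_keyword in param_lower for pos_keyword in ['pos', 'position', 'x', 'y', 'z', 'angle']):
--             parameter_groups['Position'].append(param)
--         else:
--             parameter_groups['Other'].append(param)
--
--     # Remove empty groups
--     return {k: v for k, v in parameter_groups.items() if v}
-- ===== SOURCE B (Python) =====
-- _TABLE = [
--     ('Temperature', ['temp', 'temperature', '\u00b0c', 'celsius', '\u00b0f']),
--     ('Pressure', ['press', 'pressure', 'psi', 'bar', 'mbar', 'pa']),
--     ('Flow', ['flow', 'rate', 'gpm', 'lpm', 'l/min']),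
--     ('Level', ['level', 'height', 'depth', 'tank']),
--     ('Voltage', ['volt', 'voltage', 'v', 'kv']),
--     ('Current', ['current', 'amp', 'ampere', 'ma']),
--     ('Humidity', ['humid', 'humidity', '%rh', 'moisture']),
--     ('Position', ['pos', 'position', 'x', 'y', 'z', 'angle']),
-- ]
--
--
-- def group_parameters(parameters):
--     """Group parameters by type for better visualization"""
--     # Category-major sieve: for each category in priority order, split the
--     # still-unclassified parameters into that category's group and the rest;
--     # whatever survives every sieve is 'Other'.
--     result = {}
--     remaining = list(parameters)
--     for name, keywords in _TABLE:
--         matched, rest = [], []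
--         for p in remaining:
--             low = p.lower()
--             (matched if any(kw in low for kw in keywords) else rest).append(p)
--         if matched:
--             result[name] = matched
--         remaining = rest
--     if remaining:
--         result['Other'] = remaining
--     return result
-- ===== Notes on version B (the rewrite author's own statement) =====
-- stated objective: alternative
-- what changed: Replaces A's parameter-major single pass (an if/elif chain appending each param into a pre-seeded dict, then a pass dropping empty groups) with a category-major sieve: for each category in priority order it partitions the still-unclassified parameters into that group and a shrinking remainder, inserting only non-empty groups, with the final remainder becoming 'Other'; priority is enforced by removal instead of branch order.
import Mathlib
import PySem

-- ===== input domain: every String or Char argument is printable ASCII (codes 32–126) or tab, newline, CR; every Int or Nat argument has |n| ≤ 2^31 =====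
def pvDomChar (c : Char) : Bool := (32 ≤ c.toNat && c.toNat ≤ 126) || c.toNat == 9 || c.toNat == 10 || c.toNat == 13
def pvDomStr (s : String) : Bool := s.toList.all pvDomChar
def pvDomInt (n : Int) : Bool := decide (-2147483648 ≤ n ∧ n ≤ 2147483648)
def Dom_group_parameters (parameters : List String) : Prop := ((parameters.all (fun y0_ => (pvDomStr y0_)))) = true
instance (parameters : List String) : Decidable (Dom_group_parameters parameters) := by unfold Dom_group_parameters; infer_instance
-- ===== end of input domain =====

-- B is a category-major sieve: for each category in priority order it partitions the
-- still-unclassified parameters into that group and a shrinking remainder ('Other' = what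
-- survives), replacing A's parameter-major elif chain into a pre-seeded dict plus an
-- empty-group removal pass.

-- ===== PORT A =====
def group_parameters (parameters : List String) : List (String × List String) :=
  let parameter_groups : PySem.Dict String (List String) := PySem.Dict.ofList
    [("Temperature", []), ("Pressure", []), ("Flow", []), ("Level", []),
     ("Voltage", []), ("Current", []), ("Humidity", []), ("Position", []), ("Other", [])]
  let d := parameters.foldl (fun d param =>
    let param_lower := PySem.Str.lower param
    if (["temp", "temperature", "°c", "celsius", "°f"].any fun kw => PySem.Str.isIn kw param_lower) then
      d.modify "Temperature" [] (· ++ [param])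
    else if (["press", "pressure", "psi", "bar", "mbar", "pa"].any fun kw => PySem.Str.isIn kw param_lower) then
      d.modify "Pressure" [] (· ++ [param])
    else if (["flow", "rate", "gpm", "lpm", "l/min"].any fun kw => PySem.Str.isIn kw param_lower) then
      d.modify "Flow" [] (· ++ [param])
    else if (["level", "height", "depth", "tank"].any fun kw => PySem.Str.isIn kw param_lower) then
      d.modify "Level" [] (· ++ [param])
    else if (["volt", "voltage", "v", "kv"].any fun kw => PySem.Str.isIn kw param_lower) then
      d.modify "Voltage" [] (· ++ [param])
    else if (["current", "amp", "ampere", "ma"].any fun kw => PySem.Str.isIn kw param_lower) then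
      d.modify "Current" [] (· ++ [param])
    else if (["humid", "humidity", "%rh", "moisture"].any fun kw => PySem.Str.isIn kw param_lower) then
      d.modify "Humidity" [] (· ++ [param])
    else if (["pos", "position", "x", "y", "z", "angle"].any fun kw => PySem.Str.isIn kw param_lower) then
      d.modify "Position" [] (· ++ [param])
    else
      d.modify "Other" [] (· ++ [param])) parameter_groups
  -- {k: v for k, v in parameter_groups.items() if v} : a dict comprehension over the items,
  -- returned as the association list in the same (insertion) order
  d.items.filter (fun kv => !kv.2.isEmpty)

-- ===== PORT B =====
def pvTable : List (String × List String) :=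
  [("Temperature", ["temp", "temperature", "°c", "celsius", "°f"]),
   ("Pressure", ["press", "pressure", "psi", "bar", "mbar", "pa"]),
   ("Flow", ["flow", "rate", "gpm", "lpm", "l/min"]),
   ("Level", ["level", "height", "depth", "tank"]),
   ("Voltage", ["volt", "voltage", "v", "kv"]),
   ("Current", ["current", "amp", "ampere", "ma"]),
   ("Humidity", ["humid", "humidity", "%rh", "moisture"]),
   ("Position", ["pos", "position", "x", "y", "z", "angle"])]

-- the 'for name, keywords in _TABLE' loop with its shrinking 'remaining' and the final
-- 'Other' insertion; 'result' is the dict (distinct keys inserted in order)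
def pvGroupGo : List (String × List String) → List String → List (String × List String) → List (String × List String)
  | [], remaining, result =>
      if !remaining.isEmpty then result ++ [("Other", remaining)] else result
  | (name, keywords) :: tbl, remaining, result =>
      -- the inner 'for p in remaining' loop appending to matched / rest
      let pr := remaining.foldl (fun (acc : List String × List String) p =>
          let low := PySem.Str.lower p
          if keywords.any (fun kw => PySem.Str.isIn kw low) then (acc.1 ++ [p], acc.2)
          else (acc.1, acc.2 ++ [p])) ([], [])
      pvGroupGo tbl pr.2 (if !pr.1.isEmpty then result ++ [(name, pr.1)] else result)

def group_parameters_alt (parameters : List String) : List (String × List String) :=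
  pvGroupGo pvTable parameters []

-- ===== PRECONDITION & SPEC =====
def Spec_group_parameters (parameters : List String) (out : List (String × List String)) : Prop := out = group_parameters_alt parameters
instance (parameters : List String) (out : List (String × List String)) : Decidable (Spec_group_parameters parameters out) := by unfold Spec_group_parameters; infer_instance

-- ===== CLAIM (what is proved, stated in full; the proofs are below) =====
def Claim_equal_group_parameters : Prop := ∀ (parameters : List String), Dom_group_parameters parameters → Spec_group_parameters parameters (group_parameters parameters)

-- ===== LEMMAS AND PROOFS =====

-- first category of a table whose keyword list matches, "Other" on fall-through
def pvFirstCat : List (String × List String) → String → String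
  | [], _ => "Other"
  | (name, kws) :: rest, pl =>
      if kws.any (fun kw => PySem.Str.isIn kw pl) then name else pvFirstCat rest pl

def pvClassify (param : String) : String := pvFirstCat pvTable (PySem.Str.lower param)

theorem pvFirstCat_mem (t : List (String × List String)) (pl : String) :
    pvFirstCat t pl ∈ t.map (·.1) ++ ["Other"] := by
  induction t with
  | nil => simp [pvFirstCat]
  | cons hd tl ih =>
    obtain ⟨n, kws⟩ := hd
    simp only [pvFirstCat, List.map_cons, List.cons_append]
    split_ifs with h
    · exact List.mem_cons_self
    · exact List.mem_cons_of_mem _ ih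

-- a dict with distinct keys is its key list paired with the stored values
theorem pv_items_eq_keys_map {κ ν : Type} [BEq κ] [LawfulBEq κ] (l : List (κ × ν)) (v0 : ν)
    (h : (l.map (·.1)).Nodup) :
    l = (l.map (·.1)).map (fun k => (k, (PySem.Dict.mk l).getD k v0)) := by
  induction l with
  | nil => rfl
  | cons hd tl ih =>
    obtain ⟨k, v⟩ := hd
    simp only [List.map_cons, List.nodup_cons] at h
    simp only [List.map_cons, List.cons.injEq]
    refine ⟨?_, ?_⟩
    · simp [PySem.Dict.getD_eq_get?_getD, PySem.Dict.get?_mk_cons]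
    · conv_lhs => rw [ih h.2]
      refine List.map_congr_left (fun a ha => ?_)
      have hne : ¬ (k == a) = true := by
        intro hk; exact h.1 ((LawfulBEq.eq_of_beq hk) ▸ ha)
      simp [PySem.Dict.getD_eq_get?_getD, PySem.Dict.get?_mk_cons, hne]

-- A's elif chain appends param to exactly the group pvClassify selects
theorem pv_stepA_eq (d : PySem.Dict String (List String)) (param : String) :
    (let param_lower := PySem.Str.lower param
     if (["temp", "temperature", "°c", "celsius", "°f"].any fun kw => PySem.Str.isIn kw param_lower) then
       d.modify "Temperature" [] (· ++ [param])
     else if (["press", "pressure", "psi", "bar", "mbar", "pa"].any fun kw => PySem.Str.isIn kw param_lower) then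
       d.modify "Pressure" [] (· ++ [param])
     else if (["flow", "rate", "gpm", "lpm", "l/min"].any fun kw => PySem.Str.isIn kw param_lower) then
       d.modify "Flow" [] (· ++ [param])
     else if (["level", "height", "depth", "tank"].any fun kw => PySem.Str.isIn kw param_lower) then
       d.modify "Level" [] (· ++ [param])
     else if (["volt", "voltage", "v", "kv"].any fun kw => PySem.Str.isIn kw param_lower) then
       d.modify "Voltage" [] (· ++ [param])
     else if (["current", "amp", "ampere", "ma"].any fun kw => PySem.Str.isIn kw param_lower) then
       d.modify "Current" [] (· ++ [param])
     else if (["humid", "humidity", "%rh", "moisture"].any fun kw => PySem.Str.isIn kw param_lower) then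
       d.modify "Humidity" [] (· ++ [param])
     else if (["pos", "position", "x", "y", "z", "angle"].any fun kw => PySem.Str.isIn kw param_lower) then
       d.modify "Position" [] (· ++ [param])
     else
       d.modify "Other" [] (· ++ [param])) =
    d.modify (pvClassify param) [] (· ++ [param]) := by
  simp only [pvClassify, pvTable, pvFirstCat]
  split_ifs <;> rfl

theorem pv_init_getD (c : String) :
    (PySem.Dict.mk [("Temperature", ([] : List String)), ("Pressure", []), ("Flow", []), ("Level", []),
       ("Voltage", []), ("Current", []), ("Humidity", []), ("Position", []), ("Other", [])]).getD c [] = [] := by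
  simp only [PySem.Dict.getD_eq_get?_getD, PySem.Dict.get?_mk_cons]
  split_ifs <;> rfl

-- projecting the classified pairs back to the parameters
theorem pv_labeled_filter (ps : List String) (k : String) :
    ((ps.map (fun p => (pvClassify p, p))).filter (fun q => q.1 == k)).map (·.2) =
      ps.filter (fun p => pvClassify p == k) := by
  induction ps with
  | nil => rfl
  | cons p ps ih =>
    simp only [List.map_cons, List.filter_cons]
    by_cases h : (pvClassify p == k) = true <;> simp [h, ih]

-- A's result in canonical form: categories in table order (then 'Other'), each paired with
-- the params it classifies, empty groups dropped
theorem pv_A_char (parameters : List String) :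
    group_parameters parameters =
      ((pvTable.map (·.1) ++ ["Other"]).map
        (fun k => (k, parameters.filter (fun p => pvClassify p == k)))).filter
        (fun kv => !kv.2.isEmpty) := by
  unfold group_parameters
  simp only []
  rw [PySem.List.foldl_congr_mem parameters _
        (fun d param => d.modify (pvClassify param) [] (· ++ [param])) _
        (fun d param _ => pv_stepA_eq d param)]
  rw [show PySem.Dict.ofList
        [("Temperature", ([] : List String)), ("Pressure", []), ("Flow", []), ("Level", []),
         ("Voltage", []), ("Current", []), ("Humidity", []), ("Position", []), ("Other", [])] =
      PySem.Dict.mk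
        [("Temperature", []), ("Pressure", []), ("Flow", []), ("Level", []),
         ("Voltage", []), ("Current", []), ("Humidity", []), ("Position", []), ("Other", [])] from by decide]
  rw [← List.foldl_map (f := fun p => (pvClassify p, p))
        (g := fun (d : PySem.Dict String (List String)) (q : String × String) =>
          d.modify q.1 [] (· ++ [q.2]))]
  set init : PySem.Dict String (List String) := PySem.Dict.mk
      [("Temperature", []), ("Pressure", []), ("Flow", []), ("Level", []),
       ("Voltage", []), ("Current", []), ("Humidity", []), ("Position", []), ("Other", [])] with hinit
  set labeled := parameters.map fun p => (pvClassify p, p) with hlab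
  set D := labeled.foldl (fun d q => d.modify q.1 [] (· ++ [q.2])) init with hD
  have hkeys : D.keys = pvTable.map (·.1) ++ ["Other"] := by
    have h1 := PySem.Dict.keys_foldl_modify_key labeled (fun q => q.1) []
      (fun _ q => (· ++ [q.2])) init
    rw [hD, h1, PySem.Set.update_eq_append_filter]
    have h2 : (PySem.Set.ofList (labeled.map (·.1))).filter
        (fun y => !(PySem.Set.contains init.keys y)) = [] := by
      rw [List.filter_eq_nil_iff]
      intro y hy
      have hy' : y ∈ labeled.map (·.1) := (PySem.Set.mem_ofList _ y).mp hy
      obtain ⟨p, _, rfl⟩ := by simpa [hlab] using hy'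
      have hc : PySem.Set.contains init.keys (pvClassify p) = true := by
        refine (PySem.Set.contains_iff _ _).mpr ?_
        have hmem := pvFirstCat_mem pvTable (PySem.Str.lower p)
        rw [hinit]
        simpa [PySem.Dict.keys, pvTable, pvClassify] using hmem
      simp [(PySem.Set.contains_iff _ _).mp hc]
    rw [h2, List.append_nil]
    decide
  have hgetD : ∀ c, D.getD c [] = (labeled.filter (fun q => q.1 == c)).map (·.2) := by
    intro c
    rw [hD, PySem.Dict.getD_foldl_modify_append labeled init c, hinit, pv_init_getD, List.nil_append]
  have hnodup : D.keys.Nodup := by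
    rw [hkeys]; decide
  have hitems : D.items = (pvTable.map (·.1) ++ ["Other"]).map
      (fun k => (k, (labeled.filter (fun q => q.1 == k)).map (·.2))) := by
    have e1 : D.items = (D.items.map (·.1)).map (fun k => (k, (PySem.Dict.mk D.items).getD k [])) :=
      pv_items_eq_keys_map D.items [] (by exact hnodup)
    have e2 : PySem.Dict.mk D.items = D := rfl
    have e3 : D.items.map (·.1) = pvTable.map (·.1) ++ ["Other"] := hkeys
    rw [e1, e2, e3]
    exact List.map_congr_left (fun k _ => by rw [hgetD k])
  rw [hitems]
  congr 1
  refine List.map_congr_left (fun k _ => ?_)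
  congr 1
  rw [hlab]
  exact pv_labeled_filter parameters k

-- the inner partition loop computes (filter match, filter ¬match)
theorem pv_partition_foldl (q : String → Bool) (xs : List String) (a b : List String) :
    xs.foldl (fun (acc : List String × List String) p =>
        if q p then (acc.1 ++ [p], acc.2) else (acc.1, acc.2 ++ [p])) (a, b) =
      (a ++ xs.filter q, b ++ xs.filter (fun p => !q p)) := by
  induction xs generalizing a b with
  | nil => simp
  | cons x xs ih =>
    simp only [List.foldl_cons, List.filter_cons]
    by_cases h : q x = true <;> simp [h, ih]

-- the sieve's invariant: pvGroupGo over a table with distinct names (and no 'Other')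
-- appends exactly the canonical grouping of its remainder
theorem pvGroupGo_spec (t : List (String × List String)) (rem : List String)
    (res : List (String × List String)) (h : (t.map (·.1) ++ ["Other"]).Nodup) :
    pvGroupGo t rem res =
      res ++ ((t.map (·.1) ++ ["Other"]).map
        (fun k => (k, rem.filter (fun p => pvFirstCat t (PySem.Str.lower p) == k)))).filter
        (fun kv => !kv.2.isEmpty) := by
  induction t generalizing rem res with
  | nil =>
    simp only [pvGroupGo, List.map_nil, List.nil_append, List.map_cons, List.map_nil,
      pvFirstCat, List.filter]
    have : rem.filter (fun _ => ("Other" == "Other" : Bool)) = rem := by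
      simp
    rw [this]
    by_cases hre : rem.isEmpty = true <;> simp [hre]
  | cons hd tl ih =>
    obtain ⟨name, kws⟩ := hd
    rw [List.map_cons, List.cons_append] at h
    have hnm : name ∉ tl.map (·.1) ++ ["Other"] := (List.nodup_cons.mp h).1
    have htl : (tl.map (·.1) ++ ["Other"]).Nodup := (List.nodup_cons.mp h).2
    simp only [pvGroupGo]
    rw [pv_partition_foldl (fun p => kws.any fun kw => PySem.Str.isIn kw (PySem.Str.lower p)) rem [] []]
    simp only [List.nil_append]
    rw [ih _ _ htl]
    -- match the head group
    have hhead : rem.filter (fun p => kws.any fun kw => PySem.Str.isIn kw (PySem.Str.lower p)) =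
        rem.filter (fun p => pvFirstCat ((name, kws) :: tl) (PySem.Str.lower p) == name) := by
      refine List.filter_congr (fun p _ => ?_)
      simp only [pvFirstCat]
      by_cases hq : (kws.any fun kw => PySem.Str.isIn kw (PySem.Str.lower p)) = true
      · rw [if_pos hq, hq, beq_self_eq_true]
      · have hf : (kws.any fun kw => PySem.Str.isIn kw (PySem.Str.lower p)) = false := by
          simpa using hq
        rw [if_neg hq, hf]
        symm
        rw [beq_eq_false_iff_ne]
        intro he
        exact hnm (he ▸ pvFirstCat_mem tl (PySem.Str.lower p))
    -- match the tail groups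
    have htail : ∀ k ∈ tl.map (·.1) ++ ["Other"],
        (rem.filter (fun p => !(kws.any fun kw => PySem.Str.isIn kw (PySem.Str.lower p)))).filter
            (fun p => pvFirstCat tl (PySem.Str.lower p) == k) =
          rem.filter (fun p => pvFirstCat ((name, kws) :: tl) (PySem.Str.lower p) == k) := by
      intro k hk
      rw [List.filter_filter]
      refine List.filter_congr (fun p _ => ?_)
      simp only [pvFirstCat]
      by_cases hq : (kws.any fun kw => PySem.Str.isIn kw (PySem.Str.lower p)) = true
      · have hk' : (name == k) = false := by
          rw [beq_eq_false_iff_ne]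
          intro he
          exact hnm (he ▸ hk)
        rw [if_pos hq, hq, hk']
        simp
      · have hf : (kws.any fun kw => PySem.Str.isIn kw (PySem.Str.lower p)) = false := by
          simpa using hq
        rw [if_neg hq, hf]
        simp
    simp only [List.map_cons, List.cons_append, List.map_cons, List.filter_cons]
    rw [hhead]
    have hmapeq : (tl.map (·.1) ++ ["Other"]).map
        (fun k => (k, (rem.filter (fun p => !(kws.any fun kw => PySem.Str.isIn kw (PySem.Str.lower p)))).filter
          (fun p => pvFirstCat tl (PySem.Str.lower p) == k))) =
        (tl.map (·.1) ++ ["Other"]).map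
        (fun k => (k, rem.filter (fun p => pvFirstCat ((name, kws) :: tl) (PySem.Str.lower p) == k))) :=
      List.map_congr_left (fun k hk => by rw [htail k hk])
    rw [hmapeq]
    by_cases he : (rem.filter (fun p => pvFirstCat ((name, kws) :: tl) (PySem.Str.lower p) == name)).isEmpty = true
    · simp [he]
    · simp [he]

theorem group_parameters_eq_alt (parameters : List String) :
    group_parameters parameters = group_parameters_alt parameters := by
  rw [pv_A_char, group_parameters_alt, pvGroupGo_spec pvTable parameters [] (by decide),
    List.nil_append]
  rfl

-- ===== VERDICT (by name: the statement is the Claim_ definition above) =====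
theorem group_parameters_spec : Claim_equal_group_parameters := by
  intro parameters _
  unfold Spec_group_parameters
  exact group_parameters_eq_alt parameters
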